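-- pv_equiv track=rewrite | github.com/cutehammond772/problem-solving-archive | 백준/Gold/20040. 사이클 게임/사이클 게임.py | solve
-- ===== SOURCE A (Python) =====
-- def find(U, x):
--   if U[x] == x:
--     return U[x]
--
--   traversal = [x]
--   while U[traversal[-1]] != traversal[-1]:
--     traversal.append(U[traversal[-1]])
--
--   for node in traversal:
--     U[node] = traversal[-1]
--
--   return U[x]
--
-- def union(U, x, y):
--   x, y = find(U, x), find(U, y)
--
--   if x == y:
--     return
--
--   if U[x] > U[y]:
--     U[x] = U[y]
--   else:
--     U[y] = U[x]
--
-- def solve(N, M, edges):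
--   U = [x for x in range(N)]
--
--   for t in range(M):
--     x, y = edges[t]
--
--     if find(U, x) == find(U, y):
--       return t + 1
--
--     union(U, x, y)
--
--   return 0
-- ===== SOURCE B (Python) =====
-- # B: no union-find at all -- keep a flat list `label` with the component
-- # representative (the smallest member) of every node; a cycle edge is one whose
-- # endpoints carry equal labels, and a merge relabels the larger representative's
-- # component to the smaller one in a single list pass.
-- def solve(N, M, edges):
--     label = list(range(N))
--     for t in range(M):
--         x, y = edges[t]
--         a, b = label[x], label[y]
--         if a == b:
--             return t + 1
--         lo, hi = (a, b) if a < b else (b, a)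
--         label = [lo if c == hi else c for c in label]
--     return 0
-- ===== Notes on version B (the rewrite author's own statement) =====
-- stated objective: alternative
-- what changed: A is a mutable union-find (parent array, two-pass path-compressing find, root-comparison union); B drops union-find entirely and keeps a flat component-label list: a cycle edge is one whose endpoints carry equal labels, and a merge rewrites the larger representative's label to the smaller in one list pass (B trades near-linear union-find for simpler O(N)-per-merge relabeling).
-- outside the precondition, e.g. on solve(2, 3, [(0, 1), (0, 1), (5, 5)]): A returns 2, B returns 2
import Mathlib
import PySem

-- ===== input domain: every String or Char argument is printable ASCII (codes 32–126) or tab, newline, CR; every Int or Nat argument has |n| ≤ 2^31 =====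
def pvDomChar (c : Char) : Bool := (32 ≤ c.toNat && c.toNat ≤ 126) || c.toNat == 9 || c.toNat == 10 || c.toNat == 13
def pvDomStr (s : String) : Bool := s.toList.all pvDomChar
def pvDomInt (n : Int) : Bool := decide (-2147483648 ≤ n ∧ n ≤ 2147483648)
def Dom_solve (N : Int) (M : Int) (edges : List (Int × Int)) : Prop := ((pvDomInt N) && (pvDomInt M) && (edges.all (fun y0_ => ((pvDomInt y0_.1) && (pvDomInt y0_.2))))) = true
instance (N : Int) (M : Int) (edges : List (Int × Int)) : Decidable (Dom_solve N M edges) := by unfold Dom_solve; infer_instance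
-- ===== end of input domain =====

-- A detects the first cycle edge with a mutable union-find (parent array, two-pass
-- path-compressing find, root-comparison union); B drops union-find entirely and
-- keeps a flat list of component labels (the smallest member of each component),
-- relabeling the larger representative's component to the smaller on each merge.
-- Both Pythons mutate only local lists; equivalence is about the return value.
-- Port A models the union-find loops with fuel `U.length + 1`; on Pre_ inputs every
-- parent satisfies U[i] ≤ i, so a parent chain has at most U.length steps and the
-- fuel is never exhausted (a totality device, not an algorithm switch).

-- ===== PORT A =====
-- while U[traversal[-1]] != traversal[-1]: traversal.append(U[traversal[-1]])
-- (`last` is traversal[-1], carried alongside the accumulator; one fuel per append)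
def buildTravA (U : List Int) (trav : List Int) (last : Int) (fuel : Nat) : Option (List Int) :=
  match PySem.List.pyGet? U last with
  | none => none
  | some ul =>
    if ul = last then some trav
    else match fuel with
      | 0 => none
      | f + 1 => buildTravA U (trav ++ [ul]) ul f

-- for node in traversal: U[node] = traversal[-1]
def relabelA (U : List Int) (nodes : List Int) (root : Int) : Option (List Int) :=
  match nodes with
  | [] => some U
  | n :: rest =>
    match PySem.List.pySet? U n root with
    | none => none
    | some U' => relabelA U' rest root

def findA (U : List Int) (x : Int) (fuel : Nat) : Option (List Int × Int) :=
  match PySem.List.pyGet? U x with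
  | none => none
  | some ux =>
    if ux = x then some (U, ux)            -- if U[x] == x: return U[x]
    else
      match buildTravA U [x] x fuel with
      | none => none
      | some trav =>
        let root := PySem.List.pyGetD trav (-1) 0   -- traversal[-1] (trav is nonempty)
        match relabelA U trav root with
        | none => none
        | some U' =>
          match PySem.List.pyGet? U' x with          -- return U[x]
          | none => none
          | some v => some (U', v)

def unionA (U : List Int) (x y : Int) : Option (List Int) :=
  match findA U x (U.length + 1) with
  | none => none
  | some (U₁, x') =>
    match findA U₁ y (U₁.length + 1) with
    | none => none
    | some (U₂, y') =>
      if x' = y' then some U₂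
      else
        match PySem.List.pyGet? U₂ x', PySem.List.pyGet? U₂ y' with
        | some ux', some uy' =>
          if ux' > uy' then PySem.List.pySet? U₂ x' uy'
          else PySem.List.pySet? U₂ y' ux'
        | _, _ => none

-- for t in range(M): x, y = edges[t]; …   (`none` paths are Python exceptions,
-- excluded by Pre_; the port returns 0 there)
def loopA (U : List Int) (edges : List (Int × Int)) (ts : List Int) : Int :=
  match ts with
  | [] => 0
  | t :: rest =>
    match PySem.List.pyGet? edges t with
    | none => 0
    | some (x, y) =>
      match findA U x (U.length + 1) with
      | none => 0
      | some (U₁, rx) =>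
        match findA U₁ y (U₁.length + 1) with
        | none => 0
        | some (U₂, ry) =>
          if rx = ry then t + 1
          else
            match unionA U₂ x y with
            | none => 0
            | some U₃ => loopA U₃ edges rest

def solve (N : Int) (M : Int) (edges : List (Int × Int)) : Int :=
  loopA (PySem.List.pyRange 0 N 1) edges (PySem.List.pyRange 0 M 1)

-- ===== PORT B =====
-- label = list(range(N)); a, b = label[x], label[y]; if a == b: return t + 1
-- lo, hi = (a, b) if a < b else (b, a); label = [lo if c == hi else c for c in label]
def loopB (label : List Int) (edges : List (Int × Int)) (ts : List Int) : Int :=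
  match ts with
  | [] => 0
  | t :: rest =>
    match PySem.List.pyGet? edges t with
    | none => 0
    | some (x, y) =>
      match PySem.List.pyGet? label x, PySem.List.pyGet? label y with
      | some a, some b =>
        if a = b then t + 1
        else
          let lo := if a < b then a else b
          let hi := if a < b then b else a
          loopB (label.map (fun c => if c = hi then lo else c)) edges rest
      | _, _ => 0

def solve_alt (N : Int) (M : Int) (edges : List (Int × Int)) : Int :=
  loopB (PySem.List.pyRange 0 N 1) edges (PySem.List.pyRange 0 M 1)

-- ===== PRECONDITION & SPEC =====
-- Pre_ excludes the inputs where Python raises IndexError (M beyond the edge list,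
-- or an endpoint outside [-N, N)).  It is slightly narrower than A's true domain:
-- A can return early at a cycle edge before ever reading a later out-of-range
-- edge, while Pre_ asks all first M edges to be in range.
def Pre_solve (N : Int) (M : Int) (edges : List (Int × Int)) : Prop :=
  M ≤ (edges.length : Int) ∧
  ∀ p ∈ edges.take M.toNat, (-N ≤ p.1 ∧ p.1 < N) ∧ (-N ≤ p.2 ∧ p.2 < N)
instance (N : Int) (M : Int) (edges : List (Int × Int)) : Decidable (Pre_solve N M edges) := by
  unfold Pre_solve; infer_instance

def pvWitness_solve : Int × Int × (List (Int × Int)) := (3, 2, [(0, 1), (1, 2)])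

def Spec_solve (N : Int) (M : Int) (edges : List (Int × Int)) (out : Int) : Prop := out = solve_alt N M edges
instance (N : Int) (M : Int) (edges : List (Int × Int)) (out : Int) : Decidable (Spec_solve N M edges out) := by unfold Spec_solve; infer_instance

-- ===== CLAIM (what is proved, stated in full; the proofs are below) =====
def Claim_equal_solve : Prop := ∀ (N : Int) (M : Int) (edges : List (Int × Int)), Dom_solve N M edges → Pre_solve N M edges → Spec_solve N M edges (solve N M edges)

-- ===== LEMMAS AND PROOFS =====

-- normalized (Python) index into a list of length n
def nx (n : Nat) (x : Int) : Nat := if x < 0 then n - (-x).toNat else x.toNat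

-- loop invariant on A's parent array: every parent is a node index not above its child
def GoodU (U : List Int) : Prop := ∀ k, k < U.length → 0 ≤ U.getD k 0 ∧ U.getD k 0 ≤ (k : Int)

-- root of k in A's parent array, with fuel
def rtF (U : List Int) : Nat → Nat → Nat
  | 0, k => k
  | f + 1, k => if U.getD k 0 = (k : Int) then k else rtF U f (U.getD k 0).toNat

def rt (U : List Int) (k : Nat) : Nat := rtF U U.length k

theorem nx_lt (n : Nat) (x : Int) (h1 : -(n : Int) ≤ x) (h2 : x < (n : Int)) : nx n x < n := by
  unfold nx; split_ifs with h <;> omega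

theorem pyIdx_norm (n : Nat) (x : Int) (h1 : -(n : Int) ≤ x) (h2 : x < (n : Int)) :
    PySem.List.pyIdx? n x = some (nx n x) := by
  unfold PySem.List.pyIdx? nx
  by_cases h : x < 0
  · have h0 : ¬ 0 ≤ x := by omega
    simp [h0, h, h1]
  · have h0 : 0 ≤ x := by omega
    simp [h0, h, h2]

theorem getD_some (U : List Int) (k : Nat) (hk : k < U.length) :
    U[k]? = some (U.getD k 0) := by
  rw [List.getElem?_eq_getElem hk, List.getD_eq_getElem U 0 hk]

theorem pyGet?_norm (U : List Int) (x : Int) (h1 : -(U.length : Int) ≤ x) (h2 : x < (U.length : Int)) :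
    PySem.List.pyGet? U x = some (U.getD (nx U.length x) 0) := by
  unfold PySem.List.pyGet?
  rw [pyIdx_norm _ _ h1 h2, Option.bind_some, getD_some _ _ (nx_lt _ _ h1 h2)]

theorem pySet?_norm (U : List Int) (x : Int) (v : Int) (h1 : -(U.length : Int) ≤ x) (h2 : x < (U.length : Int)) :
    PySem.List.pySet? U x v = some (U.set (nx U.length x) v) := by
  unfold PySem.List.pySet?
  rw [pyIdx_norm _ _ h1 h2, Option.map_some]

theorem getD_set (U : List Int) (i k : Nat) (v : Int) (hk : k < U.length) :
    (U.set i v).getD k 0 = if k = i then v else U.getD k 0 := by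
  by_cases h : k = i
  · subst h
    rw [List.getD_eq_getElem _ 0 (by simpa using hk), List.getElem_set_self (by simpa using hk)]
    simp
  · rw [List.getD_eq_getElem _ 0 (by simpa using hk), List.getD_eq_getElem U 0 hk,
      List.getElem_set_ne (by omega)]
    simp [h]

theorem getD_map_if (L : List Int) (f : Int → Int) (k : Nat) (hk : k < L.length) :
    (L.map f).getD k 0 = f (L.getD k 0) := by
  rw [List.getD_eq_getElem _ 0 (by simpa using hk), List.getD_eq_getElem L 0 hk, List.getElem_map]

theorem rtF_fix (U : List Int) (k : Nat) (h : U.getD k 0 = (k : Int)) :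
    ∀ f, rtF U f k = k := by
  intro f
  cases f with
  | zero => rfl
  | succ n => simp only [rtF, if_pos h]

theorem rt_fix (U : List Int) (k : Nat) (h : U.getD k 0 = (k : Int)) : rt U k = k :=
  rtF_fix U k h U.length

theorem rtF_stable (U : List Int) (hU : GoodU U) :
    ∀ k, k < U.length → ∀ f, k < f → rtF U f k = rt U k := by
  intro k
  induction k using Nat.strong_induction_on with
  | _ k ih =>
    intro hk f hf
    obtain ⟨g, rfl⟩ : ∃ g, f = g + 1 := ⟨f - 1, by omega⟩
    obtain ⟨h, hlen⟩ : ∃ h, U.length = h + 1 := ⟨U.length - 1, by omega⟩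
    by_cases hc : U.getD k 0 = (k : Int)
    · rw [rt, hlen]
      simp only [rtF, if_pos hc]
    · have hgood := hU k hk
      have hj : (U.getD k 0).toNat < k := by omega
      have e1 : rtF U (g + 1) k = rtF U g (U.getD k 0).toNat := by
        simp only [rtF, if_neg hc]
      have e2 : rtF U (h + 1) k = rtF U h (U.getD k 0).toNat := by
        simp only [rtF, if_neg hc]
      rw [e1, rt, hlen, e2,
        ih _ hj (by omega) g (by omega), ih _ hj (by omega) h (by omega)]

theorem rt_unfold (U : List Int) (hU : GoodU U) (k : Nat) (hk : k < U.length) :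
    rt U k = if U.getD k 0 = (k : Int) then k else rt U (U.getD k 0).toNat := by
  by_cases hc : U.getD k 0 = (k : Int)
  · rw [if_pos hc, rt_fix U k hc]
  · obtain ⟨h, hlen⟩ : ∃ h, U.length = h + 1 := ⟨U.length - 1, by omega⟩
    have hgood := hU k hk
    have hj : (U.getD k 0).toNat < k := by omega
    rw [rt, hlen]
    simp only [rtF, if_neg hc]
    rw [rtF_stable U hU _ (by omega) h (by omega)]

theorem rt_spec (U : List Int) (hU : GoodU U) :
    ∀ k, k < U.length → rt U k ≤ k ∧ U.getD (rt U k) 0 = ((rt U k : Nat) : Int) := by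
  intro k
  induction k using Nat.strong_induction_on with
  | _ k ih =>
    intro hk
    rw [rt_unfold U hU k hk]
    by_cases hc : U.getD k 0 = (k : Int)
    · rw [if_pos hc]
      exact ⟨le_refl k, hc⟩
    · have hgood := hU k hk
      have hj : (U.getD k 0).toNat < k := by omega
      rw [if_neg hc]
      obtain ⟨h1, h2⟩ := ih _ hj (by omega)
      exact ⟨by omega, h2⟩

theorem rt_lt (U : List Int) (hU : GoodU U) (k : Nat) (hk : k < U.length) : rt U k < U.length :=
  lt_of_le_of_lt (rt_spec U hU k hk).1 hk

theorem rt_eq_self_cell (U : List Int) (hU : GoodU U) (k : Nat) (hk : k < U.length)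
    (h : rt U k = k) : U.getD k 0 = (k : Int) := by
  by_contra hc
  have hgood := hU k hk
  have hj : (U.getD k 0).toNat < k := by omega
  have hle := (rt_spec U hU (U.getD k 0).toNat (by omega)).1
  rw [rt_unfold U hU k hk, if_neg hc] at h
  omega

-- one path-compression write U[i] := rt U i preserves GoodU and every root
theorem set_compress (U : List Int) (hU : GoodU U) (i : Nat) (hi : i < U.length) :
    GoodU (U.set i ((rt U i : Nat) : Int)) ∧
    (∀ k, k < U.length → rt (U.set i ((rt U i : Nat) : Int)) k = rt U k) := by
  have hle := (rt_spec U hU i hi).1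
  have hcell := (rt_spec U hU i hi).2
  have hGood : GoodU (U.set i ((rt U i : Nat) : Int)) := by
    intro k hk
    rw [List.length_set] at hk
    rw [getD_set U i k _ hk]
    by_cases h : k = i
    · subst h; rw [if_pos rfl]; omega
    · rw [if_neg h]; exact hU k hk
  refine ⟨hGood, ?_⟩
  intro k
  induction k using Nat.strong_induction_on with
  | _ k ih =>
    intro hk
    have hk' : k < (U.set i ((rt U i : Nat) : Int)).length := by simpa using hk
    by_cases h : k = i
    · subst h
      have hgd : (U.set k ((rt U k : Nat) : Int)).getD k 0 = ((rt U k : Nat) : Int) := by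
        rw [getD_set U k k _ hk, if_pos rfl]
      by_cases hri : rt U k = k
      · rw [rt_unfold _ hGood k hk', hgd, hri, if_pos rfl]
      · have hcast : ¬ ((rt U k : Nat) : Int) = (k : Int) := by
          intro hc; exact hri (by exact_mod_cast hc)
        rw [rt_unfold _ hGood k hk', hgd, if_neg hcast, Int.toNat_natCast]
        rw [ih (rt U k) (lt_of_le_of_ne hle hri) (rt_lt U hU k hk)]
        rw [rt_fix U (rt U k) hcell]
    · have hgd : (U.set i ((rt U i : Nat) : Int)).getD k 0 = U.getD k 0 := by
        rw [getD_set U i k _ hk, if_neg h]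
      by_cases hc : U.getD k 0 = (k : Int)
      · rw [rt_unfold _ hGood k hk', hgd, if_pos hc, rt_fix U k hc]
      · have hgood := hU k hk
        have hj : (U.getD k 0).toNat < k := by omega
        rw [rt_unfold _ hGood k hk', hgd, if_neg hc,
          ih _ hj (by omega), rt_unfold U hU k hk, if_neg hc]

-- the union write U[a] := b (two roots, b < a) rewrites exactly the a-rooted class
theorem set_merge (U : List Int) (hU : GoodU U) (a b : Nat) (ha : a < U.length)
    (hca : U.getD a 0 = (a : Int)) (hcb : U.getD b 0 = (b : Int)) (hba : b < a) :
    GoodU (U.set a ((b : Nat) : Int)) ∧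
    (∀ k, k < U.length → rt (U.set a ((b : Nat) : Int)) k = if rt U k = a then b else rt U k) := by
  have hGood : GoodU (U.set a ((b : Nat) : Int)) := by
    intro k hk
    rw [List.length_set] at hk
    rw [getD_set U a k _ hk]
    by_cases h : k = a
    · subst h; rw [if_pos rfl]; omega
    · rw [if_neg h]; exact hU k hk
  refine ⟨hGood, ?_⟩
  intro k
  induction k using Nat.strong_induction_on with
  | _ k ih =>
    intro hk
    have hk' : k < (U.set a ((b : Nat) : Int)).length := by simpa using hk
    by_cases h : k = a
    · subst h
      have hgd : (U.set k ((b : Nat) : Int)).getD k 0 = ((b : Nat) : Int) := by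
        rw [getD_set U k k _ hk, if_pos rfl]
      have hcast : ¬ ((b : Nat) : Int) = (k : Int) := by
        intro hc; omega
      rw [rt_unfold _ hGood k hk', hgd, if_neg hcast, Int.toNat_natCast]
      rw [ih b (by omega) (by omega), rt_fix U b hcb, rt_fix U k hca, if_pos rfl]
      simp [hba.ne]
    · have hgd : (U.set a ((b : Nat) : Int)).getD k 0 = U.getD k 0 := by
        rw [getD_set U a k _ hk, if_neg h]
      by_cases hc : U.getD k 0 = (k : Int)
      · rw [rt_unfold _ hGood k hk', hgd, if_pos hc, rt_fix U k hc, if_neg h]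
      · have hgood := hU k hk
        have hj : (U.getD k 0).toNat < k := by omega
        rw [rt_unfold _ hGood k hk', hgd, if_neg hc,
          ih _ hj (by omega), rt_unfold U hU k hk, if_neg hc]

-- the parent chain above x, excluding x itself (buildTravA's appends)
def tailChain (U : List Int) (y : Int) (fuel : Nat) : Option (List Int) :=
  match PySem.List.pyGet? U y with
  | none => none
  | some uy =>
    if uy = y then some []
    else match fuel with
      | 0 => none
      | f + 1 => (tailChain U uy f).map (uy :: ·)

theorem buildTravA_eq (U : List Int) (fuel : Nat) :
    ∀ trav last, buildTravA U trav last fuel = (tailChain U last fuel).map (trav ++ ·) := by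
  induction fuel with
  | zero =>
    intro trav last
    unfold buildTravA tailChain
    cases PySem.List.pyGet? U last with
    | none => rfl
    | some ul => by_cases h : ul = last <;> simp [h]
  | succ f ih =>
    intro trav last
    unfold buildTravA tailChain
    cases PySem.List.pyGet? U last with
    | none => rfl
    | some ul =>
      by_cases h : ul = last
      · simp [h]
      · simp only [h, ih]
        cases tailChain U ul f <;> simp

theorem pyGetD_neg_one_cons (a b : Int) (l : List Int) :
    PySem.List.pyGetD (a :: b :: l) (-1) 0 = PySem.List.pyGetD (b :: l) (-1) 0 := by
  rw [PySem.List.pyGetD_neg_ofNat (a :: b :: l) 1 0 (by omega) (by simp),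
      PySem.List.pyGetD_neg_ofNat (b :: l) 1 0 (by omega) (by simp)]
  simp

theorem tailChain_stop (U : List Int) (y uy : Int) (fuel : Nat)
    (h : PySem.List.pyGet? U y = some uy) (heq : uy = y) : tailChain U y fuel = some [] := by
  rw [tailChain.eq_def]
  simp [h, heq]

theorem tailChain_succ (U : List Int) (y uy : Int) (f : Nat)
    (h : PySem.List.pyGet? U y = some uy) (hne : ¬ uy = y) :
    tailChain U y (f + 1) = (tailChain U uy f).map (uy :: ·) := by
  rw [tailChain.eq_def]
  simp [h, hne]

theorem pyGetD_neg_one_singleton (a : Int) : PySem.List.pyGetD [a] (-1) 0 = a := by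
  simp [PySem.List.pyGetD, PySem.List.pyGet?, PySem.List.pyIdx?]

theorem tailChain_spec (U : List Int) (hU : GoodU U) :
    ∀ k : Nat, k < U.length → ∀ x : Int, -(U.length : Int) ≤ x → x < (U.length : Int) →
    nx U.length x = k → ∀ f : Nat, k + 2 ≤ f →
    ∃ tc, tailChain U x f = some tc ∧
      (∀ m ∈ tc, 0 ≤ m ∧ m < (U.length : Int) ∧ rt U (nx U.length m) = rt U k) ∧
      PySem.List.pyGetD (x :: tc) (-1) 0 = ((rt U k : Nat) : Int) := by
  intro k
  induction k using Nat.strong_induction_on with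
  | _ k ih =>
    intro hk x hx1 hx2 hnx f hf
    have hget : PySem.List.pyGet? U x = some (U.getD k 0) := by
      rw [pyGet?_norm U x hx1 hx2, hnx]
    have hgood := hU k hk
    by_cases hc : U.getD k 0 = x
    · -- U[x] == x: the chain above x is empty, x is its own root
      refine ⟨[], ?_, by simp, ?_⟩
      · exact tailChain_stop U x _ f hget hc
      · have hx0 : 0 ≤ x := by rw [← hc]; exact hgood.1
        have hxk : x = (k : Int) := by
          rw [← hnx]; unfold nx; split_ifs with h <;> omega
        have : rt U k = k := rt_fix U k (by rw [hc, hxk])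
        rw [PySem.List.pyGetD_neg_one [x] 0 (by simp), List.getLast_singleton, this]
        exact hxk
    · obtain ⟨f', rfl⟩ : ∃ f', f = f' + 1 := ⟨f - 1, by omega⟩
      set ux := U.getD k 0 with hux
      have hux0 : 0 ≤ ux := hgood.1
      have huxk : ux ≤ (k : Int) := hgood.2
      have huxlt : ux < (U.length : Int) := by omega
      have hnxux : nx U.length ux = ux.toNat := by unfold nx; split_ifs with h <;> omega
      by_cases hj : ux.toNat = k
      · -- the parent of x is the root k itself (x was a negative alias of k)
        have huxk' : ux = (k : Int) := by omega
        have hcellk : U.getD k 0 = (k : Int) := huxk'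
        have hrtk : rt U k = k := rt_fix U k hcellk
        have hgetux : PySem.List.pyGet? U ux = some (U.getD k 0) := by
          rw [pyGet?_norm U ux (by omega) huxlt, hnxux, hj]
        have hinner : tailChain U ux f' = some [] :=
          tailChain_stop U ux _ f' hgetux (by rw [hcellk, huxk'])
        refine ⟨[ux], ?_, ?_, ?_⟩
        · rw [tailChain_succ U x ux f' hget hc, hinner]
          rfl
        · intro m hm
          simp only [List.mem_singleton] at hm
          subst hm
          exact ⟨hux0, huxlt, by rw [hnxux, hj]⟩
        · rw [pyGetD_neg_one_cons, pyGetD_neg_one_singleton ux, hrtk]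
          exact huxk'
      · -- strict step down the chain
        have hjlt : ux.toNat < k := by omega
        obtain ⟨tc', htc', hmem', hlast'⟩ :=
          ih ux.toNat hjlt (by omega) ux (by omega) huxlt hnxux f' (by omega)
        have hrtk : rt U k = rt U ux.toNat := by
          have hne : ¬ U.getD k 0 = (k : Int) := by rw [← hux]; omega
          rw [rt_unfold U hU k hk, if_neg hne]
        refine ⟨ux :: tc', ?_, ?_, ?_⟩
        · rw [tailChain_succ U x ux f' hget hc, htc']
          rfl
        · intro m hm
          rcases List.mem_cons.mp hm with h | h
          · subst h; exact ⟨hux0, huxlt, by rw [hnxux, hrtk]⟩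
          · obtain ⟨a1, a2, a3⟩ := hmem' m h
            exact ⟨a1, a2, by rw [a3, hrtk]⟩
        · rw [pyGetD_neg_one_cons, hlast', hrtk]

-- reading back a cell just set
theorem pyGet?_after_set (V W : List Int) (i r : Int) (h : PySem.List.pySet? V i r = some W) :
    PySem.List.pyGet? W i = some r := by
  simp only [PySem.List.pySet?, PySem.List.pyGet?] at h ⊢
  cases hk : PySem.List.pyIdx? V.length i with
  | none => simp [hk] at h
  | some k =>
    simp only [hk, Option.map_some, Option.some.injEq] at h
    subst h
    have hkrange : k < V.length := by
      simp only [PySem.List.pyIdx?] at hk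
      split_ifs at hk with h1 h2 h3 <;> simp_all <;> omega
    simp [List.length_set, hk, List.getElem?_set, hkrange]

-- a cell already holding r still holds r after any same-value set
theorem pyGet?_preserved (V W : List Int) (i j r : Int)
    (hset : PySem.List.pySet? V j r = some W) (hold : PySem.List.pyGet? V i = some r) :
    PySem.List.pyGet? W i = some r := by
  simp only [PySem.List.pySet?, PySem.List.pyGet?] at hset hold ⊢
  cases hj : PySem.List.pyIdx? V.length j with
  | none => simp [hj] at hset
  | some kj =>
    simp only [hj, Option.map_some, Option.some.injEq] at hset
    subst hset
    cases hi : PySem.List.pyIdx? V.length i with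
    | none => simp [hi] at hold
    | some ki =>
      simp only [hi, Option.bind_some] at hold
      simp only [List.length_set, hi, Option.bind_some, List.getElem?_set]
      by_cases h : kj = ki
      · subst h
        have : kj < V.length := by
          by_contra hh
          simp [List.getElem?_eq_none (le_of_not_gt hh)] at hold
        simp [this]
      · simp [h, hold]

theorem relabelA_preserved (r : Int) :
    ∀ (ns : List Int) (V W : List Int) (i : Int),
      relabelA V ns r = some W → PySem.List.pyGet? V i = some r →
      PySem.List.pyGet? W i = some r := by
  intro ns
  induction ns with
  | nil => intro V W i h hold; simp only [relabelA, Option.some.injEq] at h; subst h; exact hold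
  | cons n rest ih =>
    intro V W i h hold
    simp only [relabelA] at h
    cases hn : PySem.List.pySet? V n r with
    | none => simp [hn] at h
    | some V' =>
      simp only [hn] at h
      exact ih V' W i h (pyGet?_preserved V V' i n r hn hold)

-- after relabelling x :: tc to r, cell x reads r
theorem relabelA_head_get (U W : List Int) (x r : Int) (tc : List Int)
    (h : relabelA U (x :: tc) r = some W) : PySem.List.pyGet? W x = some r := by
  simp only [relabelA] at h
  cases hs : PySem.List.pySet? U x r with
  | none => simp [hs] at h
  | some U' =>
    simp only [hs] at h
    exact relabelA_preserved r tc U' W x h (pyGet?_after_set U U' x r hs)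

theorem relabelA_spec (r : Nat) :
    ∀ (nodes : List Int) (U : List Int), GoodU U →
    (∀ m ∈ nodes, -(U.length : Int) ≤ m ∧ m < (U.length : Int) ∧ rt U (nx U.length m) = r) →
    U.getD r 0 = (r : Int) → r < U.length →
    ∃ U', relabelA U nodes ((r : Nat) : Int) = some U' ∧ U'.length = U.length ∧ GoodU U' ∧
      (∀ k, k < U.length → rt U' k = rt U k) := by
  intro nodes
  induction nodes with
  | nil =>
    intro U hU _ _ _
    exact ⟨U, rfl, rfl, hU, fun k _ => rfl⟩
  | cons m rest ih =>
    intro U hU hmem hcell hr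
    obtain ⟨hm1, hm2, hm3⟩ := hmem m (List.mem_cons_self)
    have hi : nx U.length m < U.length := nx_lt _ _ hm1 hm2
    have hset : PySem.List.pySet? U m ((r : Nat) : Int) =
        some (U.set (nx U.length m) ((r : Nat) : Int)) := pySet?_norm U m _ hm1 hm2
    set U₁ := U.set (nx U.length m) ((r : Nat) : Int) with hU₁
    have hcomp := set_compress U hU (nx U.length m) hi
    rw [hm3] at hcomp
    obtain ⟨hGood₁, hrt₁⟩ := hcomp
    have hlen₁ : U₁.length = U.length := by rw [hU₁, List.length_set]
    have hcell₁ : U₁.getD r 0 = (r : Int) := by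
      rw [hU₁, getD_set U _ r _ hr]
      split_ifs with h
      · rfl
      · exact hcell
    obtain ⟨U', hrel, hlen', hGood', hrt'⟩ := ih U₁ hGood₁
      (by
        intro m' hm'
        obtain ⟨a1, a2, a3⟩ := hmem m' (List.mem_cons_of_mem _ hm')
        rw [hlen₁]
        exact ⟨a1, a2, by rw [hrt₁ _ (nx_lt _ _ a1 a2), a3]⟩)
      hcell₁ (by omega)
    refine ⟨U', ?_, by omega, hGood', ?_⟩
    · simp only [relabelA, hset]
      exact hrel
    · intro k hk
      rw [hrt' k (by omega), hrt₁ k hk]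

theorem findA_spec (U : List Int) (hU : GoodU U) (x : Int)
    (hx1 : -(U.length : Int) ≤ x) (hx2 : x < (U.length : Int)) :
    ∃ U', findA U x (U.length + 1) = some (U', ((rt U (nx U.length x) : Nat) : Int)) ∧
      U'.length = U.length ∧ GoodU U' ∧ (∀ k, k < U.length → rt U' k = rt U k) := by
  set k := nx U.length x with hk
  have hklt : k < U.length := nx_lt _ _ hx1 hx2
  have hget : PySem.List.pyGet? U x = some (U.getD k 0) := pyGet?_norm U x hx1 hx2
  by_cases hc : U.getD k 0 = x
  · -- U[x] == x
    have hx0 : 0 ≤ x := by rw [← hc]; exact (hU k hklt).1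
    have hxk : x = (k : Int) := by
      rw [hk]; unfold nx; split_ifs with h <;> omega
    have hrtk : rt U k = k := rt_fix U k (by rw [hc, hxk])
    refine ⟨U, ?_, rfl, hU, fun k _ => rfl⟩
    simp only [findA, hget, if_pos hc]
    rw [hc, hxk, hrtk]
  · obtain ⟨tc, htc, hmem, hlast⟩ :=
      tailChain_spec U hU k hklt x hx1 hx2 rfl (U.length + 1) (by omega)
    have hrcell := (rt_spec U hU k hklt).2
    have hrlt := rt_lt U hU k hklt
    obtain ⟨U', hrel, hlen', hGood', hrt'⟩ := relabelA_spec (rt U k) (x :: tc) U hU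
      (by
        intro m hm
        rcases List.mem_cons.mp hm with h | h
        · subst h; exact ⟨hx1, hx2, rfl⟩
        · obtain ⟨a1, a2, a3⟩ := hmem m h
          exact ⟨by omega, a2, a3⟩)
      hrcell hrlt
    refine ⟨U', ?_, hlen', hGood', hrt'⟩
    simp only [findA, hget, if_neg hc, buildTravA_eq, htc, Option.map_some,
      List.cons_append, List.nil_append, hlast, hrel,
      relabelA_head_get U U' x ((rt U k : Nat) : Int) tc hrel]

theorem unionA_spec (U : List Int) (hU : GoodU U) (x y : Int)
    (hx1 : -(U.length : Int) ≤ x) (hx2 : x < (U.length : Int))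
    (hy1 : -(U.length : Int) ≤ y) (hy2 : y < (U.length : Int))
    (hne : rt U (nx U.length x) ≠ rt U (nx U.length y)) :
    ∃ U₃, unionA U x y = some U₃ ∧ U₃.length = U.length ∧ GoodU U₃ ∧
      (∀ k, k < U.length →
        rt U₃ k = if rt U k = max (rt U (nx U.length x)) (rt U (nx U.length y))
                  then min (rt U (nx U.length x)) (rt U (nx U.length y)) else rt U k) := by
  set a := rt U (nx U.length x) with hadef
  set b := rt U (nx U.length y) with hbdef
  obtain ⟨U₁, hf1, hlen1, hGood1, hrt1⟩ := findA_spec U hU x hx1 hx2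
  rw [← hadef] at hf1
  obtain ⟨U₂, hf2, hlen2, hGood2, hrt2⟩ := findA_spec U₁ hGood1 y (by omega) (by omega)
  have hval2 : rt U₁ (nx U₁.length y) = b := by
    rw [hlen1, hrt1 _ (nx_lt _ _ (by omega) (by omega))]
  have hrt2' : ∀ k, k < U.length → rt U₂ k = rt U k := by
    intro k hk
    rw [hrt2 k (by omega), hrt1 k hk]
  have hlen2' : U₂.length = U.length := by omega
  have halt : a < U.length := by rw [hadef]; exact rt_lt U hU _ (nx_lt _ _ hx1 hx2)
  have hblt : b < U.length := by rw [hbdef]; exact rt_lt U hU _ (nx_lt _ _ hy1 hy2)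
  -- a and b are still roots (fixed cells) in U₂
  have hra : rt U₂ a = a := by
    rw [hrt2' a halt, hadef]
    exact rt_fix U _ (rt_spec U hU _ (nx_lt _ _ hx1 hx2)).2
  have hrb : rt U₂ b = b := by
    rw [hrt2' b hblt, hbdef]
    exact rt_fix U _ (rt_spec U hU _ (nx_lt _ _ hy1 hy2)).2
  have hca : U₂.getD a 0 = (a : Int) :=
    rt_eq_self_cell U₂ hGood2 a (by omega) hra
  have hcb : U₂.getD b 0 = (b : Int) :=
    rt_eq_self_cell U₂ hGood2 b (by omega) hrb
  have hgeta : PySem.List.pyGet? U₂ ((a : Nat) : Int) = some ((a : Nat) : Int) := by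
    rw [pyGet?_norm U₂ _ (by omega) (by omega)]
    have : nx U₂.length ((a : Nat) : Int) = a := by unfold nx; split_ifs with h <;> omega
    rw [this, hca]
  have hgetb : PySem.List.pyGet? U₂ ((b : Nat) : Int) = some ((b : Nat) : Int) := by
    rw [pyGet?_norm U₂ _ (by omega) (by omega)]
    have : nx U₂.length ((b : Nat) : Int) = b := by unfold nx; split_ifs with h <;> omega
    rw [this, hcb]
  have hcastne : ¬ ((a : Nat) : Int) = ((b : Nat) : Int) := by
    intro h; exact hne (by exact_mod_cast h)
  have hf2' : findA U₁ y (U₁.length + 1) = some (U₂, ((b : Nat) : Int)) := by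
    rw [hf2, hval2]
  by_cases hab : b < a
  · -- a > b as ints: U[a] := b
    have hgt : ((a : Nat) : Int) > ((b : Nat) : Int) := by exact_mod_cast hab
    have hnxa : nx U₂.length ((a : Nat) : Int) = a := by unfold nx; split_ifs with h <;> omega
    have hset : PySem.List.pySet? U₂ ((a : Nat) : Int) ((b : Nat) : Int)
        = some (U₂.set a ((b : Nat) : Int)) := by
      rw [pySet?_norm U₂ _ _ (by omega) (by omega), hnxa]
    obtain ⟨hGood3, hrt3⟩ := set_merge U₂ hGood2 a b (by omega) hca hcb hab
    refine ⟨U₂.set a ((b : Nat) : Int), ?_, by rw [List.length_set]; omega, hGood3, ?_⟩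
    · simp only [unionA, hf1, hf2', if_neg hcastne, hgeta, hgetb, if_pos hgt, hset]
    · intro k hk
      rw [hrt3 k (by omega), hrt2' k hk]
      have hmax : max a b = a := by omega
      have hmin : min a b = b := by omega
      rw [hmax, hmin]
  · -- a < b: U[b] := a
    have hab' : a < b := by omega
    have hgt : ¬ ((a : Nat) : Int) > ((b : Nat) : Int) := by
      simp only [gt_iff_lt, not_lt]; exact_mod_cast Nat.le_of_lt hab'
    have hnxb : nx U₂.length ((b : Nat) : Int) = b := by unfold nx; split_ifs with h <;> omega
    have hset : PySem.List.pySet? U₂ ((b : Nat) : Int) ((a : Nat) : Int)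
        = some (U₂.set b ((a : Nat) : Int)) := by
      rw [pySet?_norm U₂ _ _ (by omega) (by omega), hnxb]
    obtain ⟨hGood3, hrt3⟩ := set_merge U₂ hGood2 b a (by omega) hcb hca hab'
    refine ⟨U₂.set b ((a : Nat) : Int), ?_, by rw [List.length_set]; omega, hGood3, ?_⟩
    · simp only [unionA, hf1, hf2', if_neg hcastne, hgeta, hgetb, if_neg hgt, hset]
    · intro k hk
      rw [hrt3 k (by omega), hrt2' k hk]
      have hmax : max a b = b := by omega
      have hmin : min a b = a := by omega
      rw [hmax, hmin]

-- main simulation: A's union-find loop equals B's relabeling loop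
theorem loop_eq (edges : List (Int × Int)) :
    ∀ (ts : List Int) (U L : List Int), GoodU U → L.length = U.length →
    (∀ k, k < U.length → L.getD k 0 = ((rt U k : Nat) : Int)) →
    (∀ t ∈ ts, ∃ e, PySem.List.pyGet? edges t = some e ∧
      -(U.length : Int) ≤ e.1 ∧ e.1 < (U.length : Int) ∧
      -(U.length : Int) ≤ e.2 ∧ e.2 < (U.length : Int)) →
    loopA U edges ts = loopB L edges ts := by
  intro ts
  induction ts with
  | nil => intro U L _ _ _ _; rfl
  | cons t rest ih =>
    intro U L hU hlen hinv hedge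
    obtain ⟨⟨x, y⟩, hget, hx1, hx2, hy1, hy2⟩ := hedge t (List.mem_cons_self)
    obtain ⟨U₁, hf1, hlen1, hGood1, hrt1⟩ := findA_spec U hU x hx1 hx2
    obtain ⟨U₂, hf2, hlen2, hGood2, hrt2⟩ := findA_spec U₁ hGood1 y (by omega) (by omega)
    set a := rt U (nx U.length x) with hadef
    set b := rt U (nx U.length y) with hbdef
    have hval2 : rt U₁ (nx U₁.length y) = b := by
      rw [hlen1, hrt1 _ (nx_lt _ _ (by omega) (by omega))]
    have hf2' : findA U₁ y (U₁.length + 1) = some (U₂, ((b : Nat) : Int)) := by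
      rw [hf2, hval2]
    have hLx : PySem.List.pyGet? L x = some ((a : Nat) : Int) := by
      rw [pyGet?_norm L x (by omega) (by omega)]
      have h0 : nx L.length x = nx U.length x := by rw [hlen]
      rw [h0, hinv _ (nx_lt _ _ hx1 hx2)]
    have hLy : PySem.List.pyGet? L y = some ((b : Nat) : Int) := by
      rw [pyGet?_norm L y (by omega) (by omega)]
      have h0 : nx L.length y = nx U.length y := by rw [hlen]
      rw [h0, hinv _ (nx_lt _ _ hy1 hy2)]
    by_cases heq : a = b
    · have hcast : ((a : Nat) : Int) = ((b : Nat) : Int) := by exact_mod_cast heq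
      simp only [loopA, loopB, hget, hf1, hf2', hLx, hLy, if_pos hcast]
    · have hcastne : ¬ ((a : Nat) : Int) = ((b : Nat) : Int) := by
        intro h; exact heq (by exact_mod_cast h)
      have hrt2' : ∀ k, k < U.length → rt U₂ k = rt U k := by
        intro k hk
        rw [hrt2 k (by omega), hrt1 k hk]
      have hne2 : rt U₂ (nx U₂.length x) ≠ rt U₂ (nx U₂.length y) := by
        have hl : U₂.length = U.length := by omega
        rw [hl, hrt2' _ (nx_lt _ _ hx1 hx2), hrt2' _ (nx_lt _ _ hy1 hy2)]
        exact heq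
      obtain ⟨U₃, hu, hlen3, hGood3, hrt3⟩ :=
        unionA_spec U₂ hGood2 x y (by omega) (by omega) (by omega) (by omega) hne2
      have hl2 : U₂.length = U.length := by omega
      have hax : rt U₂ (nx U₂.length x) = a := by rw [hl2, hrt2' _ (nx_lt _ _ hx1 hx2)]
      have hby : rt U₂ (nx U₂.length y) = b := by rw [hl2, hrt2' _ (nx_lt _ _ hy1 hy2)]
      -- B's lo/hi are the casts of min/max of the two roots
      have hlo : (if ((a : Nat) : Int) < ((b : Nat) : Int) then ((a : Nat) : Int) else ((b : Nat) : Int))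
          = ((min a b : Nat) : Int) := by
        split_ifs with h
        · have hab : a < b := by exact_mod_cast h
          simp [Nat.min_eq_left (Nat.le_of_lt hab)]
        · have hab : b ≤ a := by exact_mod_cast Int.not_lt.mp h
          simp [Nat.min_eq_right hab]
      have hhi : (if ((a : Nat) : Int) < ((b : Nat) : Int) then ((b : Nat) : Int) else ((a : Nat) : Int))
          = ((max a b : Nat) : Int) := by
        split_ifs with h
        · have hab : a < b := by exact_mod_cast h
          simp [Nat.max_eq_right (Nat.le_of_lt hab)]
        · have hab : b ≤ a := by exact_mod_cast Int.not_lt.mp h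
          simp [Nat.max_eq_left hab]
      simp only [loopA, loopB, hget, hf1, hf2', hLx, hLy, if_neg hcastne, hu, hlo, hhi]
      apply ih
      · exact hGood3
      · rw [List.length_map]; omega
      · intro k hk
        have hk3 : k < U.length := by omega
        rw [getD_map_if L _ k (by omega), hinv k hk3]
        rw [hrt3 k (by omega), hrt2' k hk3, hax, hby]
        split_ifs with h1 h2 h2
        · rfl
        · exact absurd (by exact_mod_cast h1) h2
        · exact absurd (congrArg (fun (n : Nat) => ((n : Nat) : Int)) h2) h1
        · rfl
      · intro t' ht'
        obtain ⟨e, he, he1, he2, he3, he4⟩ := hedge t' (List.mem_cons_of_mem _ ht')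
        refine ⟨e, he, ?_, ?_, ?_, ?_⟩ <;> omega

-- ===== VERDICT (by name: the statement is the Claim_ definition above) =====
theorem solve_spec : Claim_equal_solve := by
  intro N M edges _ hPre
  obtain ⟨hM, hRange⟩ := hPre
  unfold Spec_solve solve solve_alt
  have hcell₀ : ∀ k, k < (PySem.List.pyRange 0 N 1).length →
      (PySem.List.pyRange 0 N 1).getD k 0 = (k : Int) := by
    intro k hk
    rw [List.getD_eq_getElem _ 0 hk, PySem.List.getElem_pyRange_one]
    omega
  have hGood₀ : GoodU (PySem.List.pyRange 0 N 1) := by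
    intro k hk
    rw [hcell₀ k hk]
    constructor <;> omega
  apply loop_eq
  · exact hGood₀
  · rfl
  · intro k hk
    rw [hcell₀ k hk, rt_fix _ k (hcell₀ k hk)]
  · intro t ht
    have hmem := (PySem.List.mem_pyRange_one).mp ht
    have ht0 : 0 ≤ t := hmem.1
    have htM : t < M := hmem.2
    have htlen : t.toNat < edges.length := by omega
    have hget : PySem.List.pyGet? edges t = some edges[t.toNat] := by
      rw [PySem.List.pyGet?_of_nonneg edges ht0, List.getElem?_eq_getElem htlen]
    have h1 : t.toNat < (edges.take M.toNat).length := by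
      rw [List.length_take]; omega
    have h2 : (edges.take M.toNat)[t.toNat]'h1 = edges[t.toNat]'htlen := List.getElem_take
    have hmemtake : edges[t.toNat] ∈ edges.take M.toNat := h2 ▸ List.getElem_mem h1
    obtain ⟨⟨ha1, ha2⟩, ⟨hb1, hb2⟩⟩ := hRange _ hmemtake
    have hN1 : 1 ≤ N := by omega
    have hcast : ((PySem.List.pyRange 0 N 1).length : Int) = N := by
      rw [PySem.List.length_pyRange_one]; omega
    exact ⟨edges[t.toNat], hget, by omega, by omega, by omega, by omega⟩
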